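-- pv_equiv track=rewrite | github.com/MarcelPratikto/learningattempts | Python/histograms.py | createInvertHistogram
-- ===== SOURCE A (Python) =====
-- def createInvertHistogram(hist):
--     invHist = dict()
--     # for each character in histogram
--     for char in hist:
--         # key of invert histogram = frequency of character
--         freq = hist[char]
--         # if frequency is not in the invert histogram,
--         # create a new list as value
--         # { frequency:[character]}
--         if freq not in invHist:
--             invHist[freq] = [char]
--         # if value is in the invert histogram,
--         # append to existing list
--         # { frequency:[character, character1]}
--         else:
--             invHist[freq].append(char)
--     # sort in ascending order
--     invHist = sortDict(invHist)
--     return invHist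
--
-- def sortDict(d):
--     # turn from data type dict_keys into list
--     ascending = list(d.keys())
--     # sort list from low to high (ascending)
--     ascending.sort()
--     # assign sorted old dictionary to new dictionary
--     sortedDict = dict()
--     for key in ascending:
--         sortedDict[key] = d[key]
--     return sortedDict
-- ===== SOURCE B (Python) =====
-- def createInvertHistogram(hist):
--     # sort the distinct frequencies, then collect each frequency's characters
--     # by one filter pass over the histogram (insertion order preserved)
--     freqs = sorted(set(hist.values()))
--     return {f: [c for c, v in hist.items() if v == f] for f in freqs}
-- ===== Notes on version B (the rewrite author's own statement) =====
-- stated objective: simpler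
-- what changed: B replaces A's incrementally-built inverse dict plus key-sort-and-rebuild with a direct comprehension: sort the distinct frequencies once, then emit each frequency's characters by a filter pass over the histogram.
import Mathlib
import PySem

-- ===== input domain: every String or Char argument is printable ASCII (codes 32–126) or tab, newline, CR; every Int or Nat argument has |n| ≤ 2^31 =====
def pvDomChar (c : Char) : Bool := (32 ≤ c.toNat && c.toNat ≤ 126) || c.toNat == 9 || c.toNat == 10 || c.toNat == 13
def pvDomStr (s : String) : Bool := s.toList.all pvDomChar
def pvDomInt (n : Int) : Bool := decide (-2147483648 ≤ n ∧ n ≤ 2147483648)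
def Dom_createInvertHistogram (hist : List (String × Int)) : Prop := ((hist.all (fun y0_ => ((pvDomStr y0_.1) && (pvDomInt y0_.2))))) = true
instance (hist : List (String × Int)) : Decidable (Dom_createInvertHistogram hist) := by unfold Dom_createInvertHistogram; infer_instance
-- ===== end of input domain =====

-- B replaces A's incrementally-built inverse dict + key-sort-and-rebuild with: sort the distinct
-- frequencies once, then collect each frequency's characters by a filter pass (objective: simpler).

-- ===== PORT A =====
-- sortDict helper of A: sort the keys ascending, rebuild the dict in that order
def sortDictA (d : PySem.Dict Int (List String)) : PySem.Dict Int (List String) :=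
  let ascending := PySem.List.sorted d.keys (fun k => k) false
  ascending.foldl (fun sd k => sd.insert k (d.getD k [])) PySem.Dict.empty
  -- d[key] cannot raise here (keys come from d), so getD with [] is exact

def createInvertHistogram (hist : List (String × Int)) : List (Int × List String) :=
  let invHist : PySem.Dict Int (List String) :=
    hist.foldl (fun d kv =>
      -- freq = hist[char]; char is a key of hist, so the lookup cannot raise
      let freq := (PySem.Dict.mk hist).getD kv.1 0
      if d.contains freq = false then d.insert freq [kv.1]
      else d.modify freq [] (fun l => l ++ [kv.1])) PySem.Dict.empty
  (sortDictA invHist).items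

-- ===== PORT B =====
def createInvertHistogram_alt (hist : List (String × Int)) : List (Int × List String) :=
  let freqs := PySem.List.sorted (PySem.Set.ofList (hist.map (fun kv => kv.2))) (fun x => x) false
  freqs.map (fun f => (f, (hist.filter (fun kv => kv.2 == f)).map (fun kv => kv.1)))

-- ===== PRECONDITION & SPEC =====
-- Pre_ excludes association lists with duplicate keys: they do not represent any Python dict
-- (A's argument is a dict, whose keys are necessarily distinct), and on them the assoc-list
-- reading of A's hist[char] lookup repeats the first value.
def Pre_createInvertHistogram (hist : List (String × Int)) : Prop :=
  (hist.map (fun kv => kv.1)).Nodup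
instance (hist : List (String × Int)) : Decidable (Pre_createInvertHistogram hist) := by unfold Pre_createInvertHistogram; infer_instance
def pvWitness_createInvertHistogram : (List (String × Int)) := [("a", 2), ("b", 1), ("c", 2)]
def Spec_createInvertHistogram (hist : List (String × Int)) (out : List (Int × List String)) : Prop := out = createInvertHistogram_alt hist
instance (hist : List (String × Int)) (out : List (Int × List String)) : Decidable (Spec_createInvertHistogram hist out) := by unfold Spec_createInvertHistogram; infer_instance

-- ===== CLAIM (what is proved, stated in full; the proofs are below) =====
def Claim_equal_createInvertHistogram : Prop := ∀ (hist : List (String × Int)), Dom_createInvertHistogram hist → Pre_createInvertHistogram hist → Spec_createInvertHistogram hist (createInvertHistogram hist)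

-- ===== LEMMAS AND PROOFS =====

-- the grouping fold of A, with the hist[char] lookup resolved and the insert/modify
-- branches merged, is a single modify-append fold over the (freq, char) pairs
theorem foldA_eq_modify (hist : List (String × Int))
    (hpre : (hist.map (fun kv => kv.1)).Nodup) :
    hist.foldl (fun d kv =>
        let freq := (PySem.Dict.mk hist).getD kv.1 0
        if d.contains freq = false then d.insert freq [kv.1]
        else d.modify freq [] (fun l => l ++ [kv.1])) PySem.Dict.empty
    = (hist.map (fun kv => (kv.2, kv.1))).foldl
        (fun d p => d.modify p.1 [] (fun x => x ++ [p.2])) PySem.Dict.empty := by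
  rw [List.foldl_map]
  apply PySem.List.foldl_congr_mem'
  intro kv hkv d
  have hmem : (kv.1, kv.2) ∈ (PySem.Dict.mk hist).items := by simpa using hkv
  have hnd : (PySem.Dict.mk hist).keys.Nodup := by simpa [PySem.Dict.keys] using hpre
  have hfreq : (PySem.Dict.mk hist).getD kv.1 0 = kv.2 :=
    PySem.Dict.getD_of_mem_items _ hmem hnd 0
  simp only [hfreq]
  by_cases hc : d.contains kv.2 = false
  · rw [if_pos hc]
    simp [PySem.Dict.insert, PySem.Dict.modify, hc, PySem.Dict.getD_of_not_contains d _ hc]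
  · rw [if_neg hc]

theorem createInvertHistogram_spec : Claim_equal_createInvertHistogram := by
  intro hist _ hpre
  unfold Spec_createInvertHistogram createInvertHistogram createInvertHistogram_alt sortDictA
  simp only []
  rw [foldA_eq_modify hist hpre]
  set D := (hist.map (fun kv => (kv.2, kv.1))).foldl
      (fun d p => d.modify p.1 [] (fun x => x ++ [p.2])) PySem.Dict.empty with hD
  have hkeys : D.keys = PySem.Set.ofList (hist.map (fun kv => kv.2)) := by
    rw [hD, PySem.Dict.keys_foldl_modify_key (hist.map (fun kv => (kv.2, kv.1)))
          (fun p => p.1) [] (fun _ p x => x ++ [p.2]) PySem.Dict.empty]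
    simp [PySem.Set.update, PySem.Set.ofList, List.map_map, Function.comp_def]
  have hgetD : ∀ c, D.getD c [] = (hist.filter (fun kv => kv.2 == c)).map (fun kv => kv.1) := by
    intro c
    rw [hD, PySem.Dict.getD_foldl_modify_append]
    simp [List.filter_map, List.map_map, Function.comp_def]
  rw [hkeys]
  set asc := PySem.List.sorted (PySem.Set.ofList (hist.map (fun kv => kv.2))) (fun k => k) false with hasc
  have hnodup : asc.Nodup :=
    ((PySem.List.sorted_perm _ _ _).symm.nodup (PySem.Set.nodup_ofList _))
  have hitems := PySem.Dict.items_foldl_insert_fresh asc (fun a => a)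
      (fun a => D.getD a []) PySem.Dict.empty
      (fun a _ => by simp [PySem.Dict.contains_empty]) (by simpa using hnodup)
  rw [hitems]
  simp only [PySem.Dict.empty, List.nil_append]
  apply List.map_congr_left
  intro f _
  rw [hgetD f]
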